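-- pv_equiv track=rewrite | github.com/zlatko-minev/insert_tikz_lyx | insert_tikz_lyx_debug.py | find_ert_blocks
-- ===== SOURCE A (Python) =====
-- from typing import List, Tuple
--
-- def find_ert_blocks(lines: List[str]) -> List[Tuple[int,int]]:
--     """
--     Find all ERT blocks delimited by:
--       \begin_inset ERT
--       ...
--       \end_inset
--     Returns list of (start_idx, end_idx) inclusive.
--     """
--     ert_blocks = []
--     inside = False
--     start_i = -1
--     for i, line in enumerate(lines):
--         if not inside and "\\begin_inset ERT" in line:
--             inside = True
--             start_i = i
--         elif inside and "\\end_inset" in line: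
--             ert_blocks.append((start_i, i))
--             inside = False
--     return ert_blocks
-- ===== SOURCE B (Python) =====
-- from typing import List, Tuple
--
-- def find_ert_blocks(lines: List[str]) -> List[Tuple[int, int]]:
--     # Separate marker detection from pairing: collect begin/end line indices
--     # first, then pair them with a two-pointer sweep.
--     starts = [i for i, line in enumerate(lines) if "\\begin_inset ERT" in line]
--     ends = [i for i, line in enumerate(lines) if "\\end_inset" in line]
--     blocks = []
--     pos = 0
--     ei = 0
--     for s in starts:
--         if s < pos:
--             continue  # this begin lies inside an already-matched block
--         while ei < len(ends) and ends[ei] <= s: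
--             ei += 1
--         if ei >= len(ends):
--             break
--         e = ends[ei]
--         blocks.append((s, e))
--         pos = e + 1
--         ei += 1
--     return blocks
-- ===== Notes on version B (the rewrite author's own statement) =====
-- stated objective: alternative
-- what changed: Replaces A's inline inside/start_i state machine by two marker-index comprehensions followed by a two-pointer pairing sweep over the collected start/end indices.
import Mathlib
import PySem

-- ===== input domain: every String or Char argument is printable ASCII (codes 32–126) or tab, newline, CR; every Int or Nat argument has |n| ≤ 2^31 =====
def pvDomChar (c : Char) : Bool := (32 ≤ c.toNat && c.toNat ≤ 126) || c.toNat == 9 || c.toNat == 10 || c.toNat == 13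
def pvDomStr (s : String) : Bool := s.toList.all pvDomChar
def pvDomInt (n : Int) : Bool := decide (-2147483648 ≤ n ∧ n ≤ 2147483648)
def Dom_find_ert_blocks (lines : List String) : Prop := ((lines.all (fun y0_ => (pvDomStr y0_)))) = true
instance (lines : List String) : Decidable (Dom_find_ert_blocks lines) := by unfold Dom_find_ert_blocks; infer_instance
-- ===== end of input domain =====

-- B separates marker detection (two index comprehensions) from pairing (a two-pointer sweep),
-- replacing A's inline inside/start_i state machine; same behaviour, alternative decomposition.

-- ===== PORT A =====
-- one step of A's loop body; state = (ert_blocks, inside, start_i)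
def stepA (st : List (Int × Int) × Bool × Int) (p : Int × String) :
    List (Int × Int) × Bool × Int :=
  if !st.2.1 && PySem.Str.isIn "\\begin_inset ERT" p.2 then (st.1, true, p.1)
  else if st.2.1 && PySem.Str.isIn "\\end_inset" p.2 then (st.1 ++ [(st.2.2, p.1)], false, st.2.2)
  else st

def find_ert_blocks (lines : List String) : List (Int × Int) :=
  ((PySem.List.enumerate lines 0).foldl stepA ([], false, -1)).1

-- ===== PORT B =====
-- the two comprehensions: indices of lines containing the marker
def markIdx (sub : String) (lines : List String) : List Int :=
  (PySem.List.enumerate lines 0).filterMap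
    (fun p => if PySem.Str.isIn sub p.2 then some p.1 else none)

-- the two-pointer pairing loop: `pos` = next allowed start, es = ends not yet passed by ei
def pairAux (pos : Int) : List Int → List Int → List (Int × Int)
  | [], _ => []
  | s :: ss, es =>
    if s < pos then pairAux pos ss es
    else
      match es.dropWhile (fun e => decide (e ≤ s)) with
      | [] => []
      | e :: es' => (s, e) :: pairAux (e + 1) ss es'

def find_ert_blocks_alt (lines : List String) : List (Int × Int) :=
  pairAux 0 (markIdx "\\begin_inset ERT" lines) (markIdx "\\end_inset" lines)

-- ===== PRECONDITION & SPEC =====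
def Spec_find_ert_blocks (lines : List String) (out : List (Int × Int)) : Prop := out = find_ert_blocks_alt lines
instance (lines : List String) (out : List (Int × Int)) : Decidable (Spec_find_ert_blocks lines out) := by unfold Spec_find_ert_blocks; infer_instance

-- ===== CLAIM (what is proved, stated in full; the proofs are below) =====
def Claim_equal_find_ert_blocks : Prop := ∀ (lines : List String), Dom_find_ert_blocks lines → Spec_find_ert_blocks lines (find_ert_blocks lines)

-- ===== LEMMAS AND PROOFS =====

-- reference state machine: machO = outside a block at line i, machI s = inside a block begun at s
mutual
def machO (i : Int) : List String → List (Int × Int)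
  | [] => []
  | x :: xs => if PySem.Str.isIn "\\begin_inset ERT" x then machI i (i + 1) xs else machO (i + 1) xs
def machI (s i : Int) : List String → List (Int × Int)
  | [] => []
  | x :: xs => if PySem.Str.isIn "\\end_inset" x then (s, i) :: machO (i + 1) xs else machI s (i + 1) xs
end

-- recursive form of the comprehensions
def marksF (sub : String) (i : Int) : List String → List Int
  | [] => []
  | x :: xs => if PySem.Str.isIn sub x then i :: marksF sub (i + 1) xs else marksF sub (i + 1) xs

theorem markIdx_eq_marksF (sub : String) (l : List String) :
    ∀ i : Int, (PySem.List.enumerate l i).filterMap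
      (fun p => if PySem.Str.isIn sub p.2 then some p.1 else none) = marksF sub i l := by
  induction l with
  | nil => intro i; simp only [PySem.List.enumerate_nil, List.filterMap_nil, marksF]
  | cons x xs ih =>
    intro i
    by_cases h : PySem.Str.isIn sub x
    · simp only [PySem.List.enumerate_cons, List.filterMap_cons, if_pos h, marksF, ih]
    · simp only [PySem.List.enumerate_cons, List.filterMap_cons, if_neg h, marksF, ih]

theorem mem_marksF_le (sub : String) (l : List String) :
    ∀ (i x : Int), x ∈ marksF sub i l → i ≤ x := by
  induction l with
  | nil => intro i x h; simp [marksF] at h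
  | cons a l ih =>
    intro i x h
    by_cases hb : PySem.Str.isIn sub a
    · simp only [marksF, if_pos hb, List.mem_cons] at h
      rcases h with h | h
      · omega
      · have := ih (i + 1) x h; omega
    · simp only [marksF, if_neg hb] at h
      have := ih (i + 1) x h; omega

theorem dropWhile_all_gt (s : Int) (es : List Int) (h : ∀ e ∈ es, s < e) :
    es.dropWhile (fun e => decide (e ≤ s)) = es := by
  cases es with
  | nil => rfl
  | cons e es =>
    have : ¬ (e ≤ s) := by have := h e (by simp); omega
    simp [List.dropWhile_cons, this]

theorem pairAux_cons_end (i : Int) (es : List Int) :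
    ∀ (ss : List Int) (pos : Int), (∀ s ∈ ss, i < s) →
      pairAux pos ss (i :: es) = pairAux pos ss es := by
  intro ss
  induction ss with
  | nil => intro pos _; rfl
  | cons s ss ih =>
    intro pos h
    have hs : i < s := h s (by simp)
    by_cases hlt : s < pos
    · simp only [pairAux, if_pos hlt]
      exact ih pos (fun t ht => h t (by simp [ht]))
    · simp only [pairAux, if_neg hlt, List.dropWhile_cons,
        show decide (i ≤ s) = true by simp; omega, if_true]

theorem pair_mach (l : List String) :
    ∀ i : Int,
      (∀ pos : Int, pos ≤ i →
        pairAux pos (marksF "\\begin_inset ERT" i l) (marksF "\\end_inset" i l) = machO i l) ∧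
      (∀ s : Int, s < i →
        (match marksF "\\end_inset" i l with
         | [] => ([] : List (Int × Int))
         | e :: es => (s, e) :: pairAux (e + 1) (marksF "\\begin_inset ERT" i l) es) = machI s i l) := by
  induction l with
  | nil =>
    intro i
    constructor
    · intro pos _; simp [marksF, pairAux, machO]
    · intro s _; simp [marksF, machI]
  | cons x xs ih =>
    intro i
    have hS := mem_marksF_le "\\begin_inset ERT" xs (i + 1)
    have hE := mem_marksF_le "\\end_inset" xs (i + 1)
    constructor
    · intro pos hpos
      by_cases hb : PySem.Str.isIn "\\begin_inset ERT" x
      · -- begin line: open a block at i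
        have hskip : ¬ (i < pos) := by omega
        have hdrop : (marksF "\\end_inset" i (x :: xs)).dropWhile (fun e => decide (e ≤ i))
            = marksF "\\end_inset" (i + 1) xs := by
          by_cases he : PySem.Str.isIn "\\end_inset" x
          · simp only [marksF, if_pos he, List.dropWhile_cons, decide_eq_true_eq,
              if_pos (le_refl i)]
            exact dropWhile_all_gt i _ (fun e hmem => by have := hE e hmem; omega)
          · simp only [marksF, if_neg he]
            exact dropWhile_all_gt i _ (fun e hmem => by have := hE e hmem; omega)
        simp only [marksF, if_pos hb, machO, pairAux, if_neg hskip, hdrop]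
        rw [show (if PySem.Str.isIn "\\end_inset" x = true then i :: marksF "\\end_inset" (i+1) xs
              else marksF "\\end_inset" (i+1) xs).dropWhile (fun e => decide (e ≤ i))
            = marksF "\\end_inset" (i + 1) xs from hdrop]
        exact (ih (i + 1)).2 i (by omega)
      · -- not a begin line
        have halt : marksF "\\begin_inset ERT" i (x :: xs) = marksF "\\begin_inset ERT" (i + 1) xs := by
          simp only [marksF, if_neg hb]
        by_cases he : PySem.Str.isIn "\\end_inset" x
        · have hends : marksF "\\end_inset" i (x :: xs) = i :: marksF "\\end_inset" (i + 1) xs := by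
            simp only [marksF, if_pos he]
          rw [halt, hends,
            pairAux_cons_end i _ _ pos (fun t ht => by have := hS t ht; omega)]
          simp only [machO, if_neg hb]
          exact (ih (i + 1)).1 pos (by omega)
        · have hends : marksF "\\end_inset" i (x :: xs) = marksF "\\end_inset" (i + 1) xs := by
            simp only [marksF, if_neg he]
          rw [halt, hends]
          simp only [machO, if_neg hb]
          exact (ih (i + 1)).1 pos (by omega)
    · intro s hs
      by_cases he : PySem.Str.isIn "\\end_inset" x
      · -- end line closes the block at i
        have hends : marksF "\\end_inset" i (x :: xs) = i :: marksF "\\end_inset" (i + 1) xs := by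
          simp only [marksF, if_pos he]
        rw [hends]
        simp only [machI, if_pos he]
        by_cases hb : PySem.Str.isIn "\\begin_inset ERT" x
        · have hstarts : marksF "\\begin_inset ERT" i (x :: xs)
              = i :: marksF "\\begin_inset ERT" (i + 1) xs := by simp only [marksF, if_pos hb]
          rw [hstarts]
          have hred : pairAux (i + 1) (i :: marksF "\\begin_inset ERT" (i + 1) xs)
              (marksF "\\end_inset" (i + 1) xs)
              = pairAux (i + 1) (marksF "\\begin_inset ERT" (i + 1) xs)
                (marksF "\\end_inset" (i + 1) xs) := by
            simp only [pairAux, if_pos (show i < i + 1 by omega)]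
          simp only [hred]
          rw [(ih (i + 1)).1 (i + 1) (by omega)]
        · have hstarts : marksF "\\begin_inset ERT" i (x :: xs)
              = marksF "\\begin_inset ERT" (i + 1) xs := by simp only [marksF, if_neg hb]
          rw [hstarts, (ih (i + 1)).1 (i + 1) (by omega)]
      · -- not an end line: stay inside
        have hends : marksF "\\end_inset" i (x :: xs) = marksF "\\end_inset" (i + 1) xs := by
          simp only [marksF, if_neg he]
        rw [hends]
        simp only [machI, if_neg he]
        by_cases hb : PySem.Str.isIn "\\begin_inset ERT" x
        · have hstarts : marksF "\\begin_inset ERT" i (x :: xs)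
              = i :: marksF "\\begin_inset ERT" (i + 1) xs := by simp only [marksF, if_pos hb]
          rw [hstarts]
          cases hEnds : marksF "\\end_inset" (i + 1) xs with
          | nil => rw [← (ih (i + 1)).2 s (by omega), hEnds]
          | cons e es =>
            have hie : i < e + 1 := by
              have := hE e (by rw [hEnds]; simp); omega
            have hred : pairAux (e + 1) (i :: marksF "\\begin_inset ERT" (i + 1) xs) es
                = pairAux (e + 1) (marksF "\\begin_inset ERT" (i + 1) xs) es := by
              simp only [pairAux, if_pos hie]
            simp only [hred]
            rw [← (ih (i + 1)).2 s (by omega), hEnds]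
        · have hstarts : marksF "\\begin_inset ERT" i (x :: xs)
              = marksF "\\begin_inset ERT" (i + 1) xs := by simp only [marksF, if_neg hb]
          rw [hstarts, ← (ih (i + 1)).2 s (by omega)]

theorem foldA_mach (l : List String) :
    ∀ (i : Int) (acc : List (Int × Int)),
      (∀ st : Int, ((PySem.List.enumerate l i).foldl stepA (acc, false, st)).1 = acc ++ machO i l) ∧
      (∀ s : Int, ((PySem.List.enumerate l i).foldl stepA (acc, true, s)).1 = acc ++ machI s i l) := by
  induction l with
  | nil =>
    intro i acc
    constructor <;> intro _ <;> simp [PySem.List.enumerate_nil, machO, machI]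
  | cons x xs ih =>
    intro i acc
    constructor
    · intro st
      by_cases hb : PySem.Str.isIn "\\begin_inset ERT" x
      · simp only [PySem.List.enumerate_cons, List.foldl_cons, stepA, hb, machO, if_pos hb]
        simpa using (ih (i + 1) acc).2 i
      · simp only [PySem.List.enumerate_cons, List.foldl_cons, stepA, machO]
        simp only [hb]
        simpa using (ih (i + 1) acc).1 st
    · intro s
      by_cases he : PySem.Str.isIn "\\end_inset" x
      · simp only [PySem.List.enumerate_cons, List.foldl_cons, stepA, machI, if_pos he]
        simp only [he]
        have := (ih (i + 1) (acc ++ [(s, i)])).1 s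
        simpa using this
      · simp only [PySem.List.enumerate_cons, List.foldl_cons, stepA, machI]
        simp only [he]
        simpa using (ih (i + 1) acc).2 s

-- ===== VERDICT (by name: the statement is the Claim_ definition above) =====
theorem find_ert_blocks_spec : Claim_equal_find_ert_blocks := by
  intro lines _
  unfold Spec_find_ert_blocks find_ert_blocks find_ert_blocks_alt markIdx
  rw [(foldA_mach lines 0 []).1 (-1), markIdx_eq_marksF, markIdx_eq_marksF,
    (pair_mach lines 0).1 0 (by omega)]
  simp
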